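-- pv_equiv track=rewrite | github.com/undeemed/SEC-Tracker | track_form4.py | abbreviate_role
-- ===== SOURCE A (Python) =====
-- def abbreviate_role(role: str) -> str:
--     """Abbreviate common role titles"""
--     role_map = {
--         'Chief Financial Officer': 'CFO',
--         'Chief Executive Officer': 'CEO',
--         'Chief Operating Officer': 'COO',
--         'Chief Technology Officer': 'CTO',
--         'Chief Information Officer': 'CIO',
--         'Chief Accounting Officer': 'CAO',
--         'Chief Legal Officer': 'CLO',
--         'Principal Accounting Officer': 'PAO',
--         'Executive Vice President': 'EVP',
--         'Senior Vice President': 'SVP',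
--         'Vice President': 'VP',
--         'Director': 'Dir',
--         '10% Owner': '10%',
--         'General Counsel': 'GC',
--         'President': 'Pres',
--         'Secretary': 'Sec',
--         'Treasurer': 'Treas',
--     }
--
--     for full, abbr in role_map.items():
--         role = role.replace(full, abbr)
--
--     role = role.rstrip(',')
--
--     return role
-- ===== SOURCE B (Python) =====
-- # First-character dispatch: a table keyed by the first letter of each title
-- # (storing the remainder), so each position tries at most one small bucket.
-- _INDEX = {
--     'C': (('hief Financial Officer', 'CFO'), ('hief Executive Officer', 'CEO'),
--           ('hief Operating Officer', 'COO'), ('hief Technology Officer', 'CTO'),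
--           ('hief Information Officer', 'CIO'), ('hief Accounting Officer', 'CAO'),
--           ('hief Legal Officer', 'CLO')),
--     'P': (('rincipal Accounting Officer', 'PAO'), ('resident', 'Pres')),
--     'E': (('xecutive Vice President', 'EVP'),),
--     'S': (('enior Vice President', 'SVP'), ('ecretary', 'Sec')),
--     'V': (('ice President', 'VP'),),
--     'D': (('irector', 'Dir'),),
--     '1': (('0% Owner', '10%'),),
--     'G': (('eneral Counsel', 'GC'),),
--     'T': (('reasurer', 'Treas'),),
-- }
--
--
-- def abbreviate_role(role: str) -> str:
--     """Abbreviate common role titles (single scan, first-letter index)."""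
--     out = []
--     i = 0
--     n = len(role)
--     while i < n:
--         c = role[i]
--         for rest, abbr in _INDEX.get(c, ()):
--             if role.startswith(rest, i + 1):
--                 out.append(abbr)
--                 i += 1 + len(rest)
--                 break
--         else:
--             out.append(c)
--             i += 1
--     return ''.join(out).rstrip(',')
-- ===== Notes on version B (the rewrite author's own statement) =====
-- stated objective: alternative
-- what changed: B replaces A's 17 sequential whole-string replace passes by a single left-to-right scan that dispatches on the current character through a first-letter index table and emits the abbreviation of the first bucket entry matching there (map order = priority), so the input is traversed once and replacement output is never rescanned.
-- intended difference: On inputs containing the substring 'Vice Presidentresident', A's later 'President'->'Pres' pass rewrites text that its own earlier 'Vice President'->'VP' pass just created (e.g. A('Vice Presidentresident') = 'VPres'), while B abbreviates only text of the original input ('VPresident'); B's value is intended since re-abbreviating already-produced output is an accident of A's pass ordering. — e.g. on abbreviate_role("Vice Presidentresident"): A returns "VPres", B returns "VPresident"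
import Mathlib
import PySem

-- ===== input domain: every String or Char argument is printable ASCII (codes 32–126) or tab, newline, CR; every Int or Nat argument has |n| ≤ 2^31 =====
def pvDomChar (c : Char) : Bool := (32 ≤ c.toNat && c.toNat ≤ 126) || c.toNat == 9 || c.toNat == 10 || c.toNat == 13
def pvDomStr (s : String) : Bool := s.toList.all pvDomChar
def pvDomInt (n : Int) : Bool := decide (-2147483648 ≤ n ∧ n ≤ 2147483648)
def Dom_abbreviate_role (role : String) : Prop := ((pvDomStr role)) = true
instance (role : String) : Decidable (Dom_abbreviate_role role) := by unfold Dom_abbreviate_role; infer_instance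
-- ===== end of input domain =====

-- B replaces A's 17 sequential whole-string replace passes by one left-to-right scan that
-- dispatches on the first character through a small index table (objective: alternative).

-- ===== PORT A =====
-- A's role_map literal (dict[str,str] → association list, insertion order)
def pvAmap : List (String × String) :=
  [("Chief Financial Officer", "CFO"),
   ("Chief Executive Officer", "CEO"),
   ("Chief Operating Officer", "COO"),
   ("Chief Technology Officer", "CTO"),
   ("Chief Information Officer", "CIO"),
   ("Chief Accounting Officer", "CAO"),
   ("Chief Legal Officer", "CLO"),
   ("Principal Accounting Officer", "PAO"),
   ("Executive Vice President", "EVP"),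
   ("Senior Vice President", "SVP"),
   ("Vice President", "VP"),
   ("Director", "Dir"),
   ("10% Owner", "10%"),
   ("General Counsel", "GC"),
   ("President", "Pres"),
   ("Secretary", "Sec"),
   ("Treasurer", "Treas")]

-- for full, abbr in role_map.items(): role = role.replace(full, abbr); then role.rstrip(',')
-- (rstrip(',') = drop the maximal trailing run of commas, exact)
def abbreviate_role (role : String) : String :=
  String.ofList
    ((((pvAmap.foldl (fun s p => PySem.Chars.replace s p.1.toList p.2.toList)
        role.toList)).reverse.dropWhile (· == ',')).reverse)

-- ===== PORT B =====
-- Source B's _INDEX: first letter → bucket of (remainder-of-title, abbreviation), map order inside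
def pvIndexB : PySem.Dict Char (List (String × String)) :=
  PySem.Dict.ofList
    [('C', [("hief Financial Officer", "CFO"), ("hief Executive Officer", "CEO"),
            ("hief Operating Officer", "COO"), ("hief Technology Officer", "CTO"),
            ("hief Information Officer", "CIO"), ("hief Accounting Officer", "CAO"),
            ("hief Legal Officer", "CLO")]),
     ('P', [("rincipal Accounting Officer", "PAO"), ("resident", "Pres")]),
     ('E', [("xecutive Vice President", "EVP")]),
     ('S', [("enior Vice President", "SVP"), ("ecretary", "Sec")]),
     ('V', [("ice President", "VP")]),
     ('D', [("irector", "Dir")]),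
     ('1', [("0% Owner", "10%")]),
     ('G', [("eneral Counsel", "GC")]),
     ('T', [("reasurer", "Treas")])]

-- Source B's while-loop: fuel = remaining length (each iteration consumes ≥ 1 character);
-- at c, try the bucket _INDEX.get(c, ()) for a remainder matching after c, else copy c
def pvScanB : Nat → List Char → List Char
  | 0, _ => []
  | fuel + 1, s =>
    match s with
    | [] => []
    | c :: t =>
      match (PySem.Dict.getD pvIndexB c []).find? (fun p => p.1.toList.isPrefixOf t) with
      | some p => p.2.toList ++ pvScanB fuel (t.drop p.1.toList.length)
      | none => c :: pvScanB fuel t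

def abbreviate_role_alt (role : String) : String :=
  String.ofList
    (((pvScanB role.toList.length role.toList).reverse.dropWhile (· == ',')).reverse)

-- ===== PRECONDITION & SPEC =====
-- On inputs containing 'Vice Presidentresident', A's later 'President'→'Pres' pass rewrites text
-- created by its own earlier 'Vice President'→'VP' pass (A 'Vice Presidentresident' = 'VPres'),
-- while B abbreviates only text of the original input ('VPresident'); B's value is intended since
-- re-abbreviating already-produced output is an accident of A's pass ordering.
def D_abbreviate_role (role : String) : Prop :=
  PySem.Str.isIn "Vice Presidentresident" role = true
instance (role : String) : Decidable (D_abbreviate_role role) := by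
  unfold D_abbreviate_role; infer_instance

def Spec_abbreviate_role (role : String) (out : String) : Prop :=
  ¬ D_abbreviate_role role → out = abbreviate_role_alt role
instance (role : String) (out : String) : Decidable (Spec_abbreviate_role role out) := by
  unfold Spec_abbreviate_role; infer_instance

def pvDiffWitness_abbreviate_role : String := "Vice Presidentresident"
def pvDiffWitnessOut_abbreviate_role : String × String := ("VPres", "VPresident")

-- ===== CLAIM (what is proved, stated in full; the proofs are below) =====
def Claim_unchanged_abbreviate_role : Prop :=
  ∀ (role : String), Dom_abbreviate_role role → Spec_abbreviate_role role (abbreviate_role role)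
def Claim_changed_abbreviate_role : Prop :=
  Dom_abbreviate_role (pvDiffWitness_abbreviate_role) ∧
  D_abbreviate_role (pvDiffWitness_abbreviate_role) ∧
  abbreviate_role (pvDiffWitness_abbreviate_role) = pvDiffWitnessOut_abbreviate_role.1 ∧
  abbreviate_role_alt (pvDiffWitness_abbreviate_role) = pvDiffWitnessOut_abbreviate_role.2 ∧
  pvDiffWitnessOut_abbreviate_role.1 ≠ pvDiffWitnessOut_abbreviate_role.2
def Claim_exact_abbreviate_role : Prop :=
  ∀ (role : String), Dom_abbreviate_role role → D_abbreviate_role role →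
    abbreviate_role role ≠ abbreviate_role_alt role

-- ===== LEMMAS AND PROOFS =====

-- the keys/abbreviations as char lists, for reasoning
def pvKeyMap : List (List Char × List Char) :=
  pvAmap.map (fun p => (p.1.toList, p.2.toList))

def pvRstripComma (cs : List Char) : List Char := (cs.reverse.dropWhile (· == ',')).reverse

-- first key of the map (in map order) matching at the head of s
def pvFirstMatch (s : List Char) : Option (List Char × List Char) :=
  pvKeyMap.find? (fun p => p.1.isPrefixOf s)

-- the pattern whose presence makes A rewrite its own output: 'Vice President'+'resident'
def pvBAD : List Char := "Vice Presidentresident".toList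

-- clean single-key one-pass replace (reasoning twin of PySem.Chars.replace for a nonempty key)
def pvRpl (old new : List Char) (l : List Char) : List Char :=
  if h : old ≠ [] ∧ old.isPrefixOf l then new ++ pvRpl old new (l.drop old.length)
  else
    match l with
    | [] => []
    | c :: t => c :: pvRpl old new t
termination_by l.length
decreasing_by
  · have h1 : old <+: l := List.isPrefixOf_iff_prefix.mp h.2
    have h2 : 0 < old.length := List.length_pos_iff.mpr h.1
    have h3 : old.length ≤ l.length := h1.length_le
    simp only [List.length_drop]; omega
  · simp

def pvFlist (ps : List (List Char × List Char)) (s : List Char) : List Char :=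
  ps.foldl (fun s p => pvRpl p.1 p.2 s) s

lemma pvFirstMatch_some_facts {s : List Char} {p : List Char × List Char}
    (h : pvFirstMatch s = some p) : p ∈ pvKeyMap ∧ p.1 ≠ [] ∧ p.1 <+: s := by
  have hmem := List.mem_of_find?_eq_some h
  have hpred := List.find?_some h
  refine ⟨hmem, ?_, List.isPrefixOf_iff_prefix.mp hpred⟩
  have hne : ∀ q ∈ pvKeyMap, q.1 ≠ [] := by decide
  exact hne p hmem

-- reasoning twin of the scan
def pvScanR (s : List Char) : List Char :=
  match h : pvFirstMatch s with
  | some p => p.2 ++ pvScanR (s.drop p.1.length)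
  | none =>
    match s with
    | [] => []
    | c :: t => c :: pvScanR t
termination_by s.length
decreasing_by
  · obtain ⟨-, hne, hpre⟩ := pvFirstMatch_some_facts h
    have h2 : 0 < p.1.length := List.length_pos_iff.mpr hne
    have h3 : p.1.length ≤ s.length := hpre.length_le
    simp only [List.length_drop]; omega
  · simp

-- unfolding lemmas
lemma pvRpl_pos {old : List Char} (new : List Char) {l : List Char}
    (hne : old ≠ []) (hp : old <+: l) :
    pvRpl old new l = new ++ pvRpl old new (l.drop old.length) := by
  rw [pvRpl, dif_pos ⟨hne, List.isPrefixOf_iff_prefix.mpr hp⟩]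

lemma pvRpl_nil {old : List Char} (new : List Char) (hne : old ≠ []) :
    pvRpl old new [] = [] := by
  rw [pvRpl, dif_neg]
  rintro ⟨-, hp⟩
  exact hne (List.prefix_nil.mp (List.isPrefixOf_iff_prefix.mp hp))

lemma pvRpl_cons_neg {old : List Char} (new : List Char) {c : Char} {t : List Char}
    (hnp : ¬ old <+: (c :: t)) :
    pvRpl old new (c :: t) = c :: pvRpl old new t := by
  rw [pvRpl, dif_neg]
  rintro ⟨-, hp⟩
  exact hnp (List.isPrefixOf_iff_prefix.mp hp)

lemma pvScanR_some {s : List Char} {p : List Char × List Char}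
    (h : pvFirstMatch s = some p) :
    pvScanR s = p.2 ++ pvScanR (s.drop p.1.length) := by
  rw [pvScanR]; split
  · rename_i p' h'
    rw [h] at h'; cases h'; rfl
  · rename_i h'; rw [h] at h'; cases h'

lemma pvScanR_none_nil : pvScanR [] = [] := by
  rw [pvScanR]; split
  · rename_i p h
    obtain ⟨-, hne, hpre⟩ := pvFirstMatch_some_facts h
    exact absurd (List.prefix_nil.mp hpre) hne
  · rfl

lemma pvScanR_none_cons {c : Char} {t : List Char}
    (h : pvFirstMatch (c :: t) = none) :
    pvScanR (c :: t) = c :: pvScanR t := by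
  rw [pvScanR]; split
  · rename_i p h'; rw [h] at h'; cases h'
  · rfl

-- bridge: PySem.Chars.replace = pvRpl for a nonempty pattern
lemma pvReplaceGo {old new : List Char} (hne : old ≠ []) :
    ∀ fuel l acc, l.length ≤ fuel →
      PySem.Chars.replace.go old new fuel l acc = acc.reverse ++ pvRpl old new l := by
  intro fuel
  induction fuel with
  | zero =>
    intro l acc hl
    have : l = [] := List.length_eq_zero_iff.mp (Nat.le_zero.mp hl)
    subst this
    rw [PySem.Chars.replace.go.eq_1, pvRpl_nil new hne]
  | succ n ih =>
    intro l acc hl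
    cases l with
    | nil => rw [PySem.Chars.replace.go.eq_2 _ _ _ _ (by omega), pvRpl_nil new hne]; simp
    | cons c t =>
      by_cases hp : old <+: (c :: t)
      · have hb : old.isPrefixOf (c :: t) = true := List.isPrefixOf_iff_prefix.mpr hp
        have hlen : ((c :: t).drop old.length).length ≤ n := by
          have h2 : 0 < old.length := List.length_pos_iff.mpr hne
          have h3 := hp.length_le
          simp only [List.length_drop, List.length_cons] at hl h3 ⊢
          omega
        rw [PySem.Chars.replace.go.eq_3, if_pos hb, ih _ _ hlen, pvRpl_pos new hne hp]
        simp
      · have hb : old.isPrefixOf (c :: t) = false := by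
          cases hq : old.isPrefixOf (c :: t)
          · rfl
          · exact absurd (List.isPrefixOf_iff_prefix.mp hq) hp
        have hlen : t.length ≤ n := by simp only [List.length_cons] at hl; omega
        rw [PySem.Chars.replace.go.eq_3, if_neg (by simp [hb]), ih _ _ hlen,
          pvRpl_cons_neg new hp]
        simp

lemma pvReplace_eq {old : List Char} (new : List Char) (hne : old ≠ []) (s : List Char) :
    PySem.Chars.replace s old new = pvRpl old new s := by
  rw [PySem.Chars.replace]
  rw [if_neg (by simp [List.isEmpty_iff, hne])]
  rw [pvReplaceGo hne s.length s [] le_rfl]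
  simp

lemma pvAcore_gen (ps : List (List Char × List Char)) (hne : ∀ q ∈ ps, q.1 ≠ []) :
    ∀ cs, ps.foldl (fun s p => PySem.Chars.replace s p.1 p.2) cs = pvFlist ps cs := by
  unfold pvFlist
  induction ps with
  | nil => intro cs; rfl
  | cons p ps ih =>
    intro cs
    simp only [List.foldl_cons]
    rw [pvReplace_eq p.2 (hne p (by simp)) cs]
    exact ih (fun q hq => hne q (by simp [hq])) _

lemma pvKeysNE : ∀ p ∈ pvKeyMap, p.1 ≠ [] ∧ p.2 ≠ [] := by decide

-- A's inline fold computes pvFlist pvKeyMap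
lemma pvAcore (cs : List Char) :
    pvAmap.foldl (fun s p => PySem.Chars.replace s p.1.toList p.2.toList) cs
      = pvFlist pvKeyMap cs := by
  have h : pvKeyMap.foldl (fun s p => PySem.Chars.replace s p.1 p.2) cs
      = pvFlist pvKeyMap cs :=
    pvAcore_gen pvKeyMap (fun q hq => (pvKeysNE q hq).1) cs
  rw [← h]
  unfold pvKeyMap
  rw [List.foldl_map]

lemma pvA_unfold (role : String) :
    abbreviate_role role = String.ofList (pvRstripComma (pvFlist pvKeyMap role.toList)) := by
  unfold abbreviate_role
  rw [pvAcore]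
  rfl

-- ===== the bucket dispatch of B computes pvFirstMatch =====

lemma pvFindFilterHead :
    ∀ (ps : List (List Char × List Char)), (∀ p ∈ ps, p.1 ≠ []) →
      ∀ (c : Char) (t : List Char),
        ps.find? (fun p => p.1.isPrefixOf (c :: t)) =
        (ps.filter (fun p => p.1.head? == some c)).find? (fun p => p.1.isPrefixOf (c :: t)) := by
  intro ps
  induction ps with
  | nil => intro _ c t; rfl
  | cons p ps ih =>
    intro hne c t
    by_cases hh : p.1.head? = some c
    · rw [List.filter_cons_of_pos (by simp [hh])]
      cases hp : p.1.isPrefixOf (c :: t)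
      · rw [List.find?_cons_of_neg (by simp [hp]), List.find?_cons_of_neg (by simp [hp]),
          ih (fun q hq => hne q (by simp [hq])) c t]
      · rw [List.find?_cons_of_pos (by simp [hp]), List.find?_cons_of_pos (by simp [hp])]
    · have hp : p.1.isPrefixOf (c :: t) = false := by
        cases h1 : p.1 with
        | nil => exact absurd h1 (hne p (by simp))
        | cons d tl =>
          rw [h1] at hh
          cases h2 : (d :: tl).isPrefixOf (c :: t)
          · rfl
          · exfalso
            have := List.isPrefixOf_iff_prefix.mp h2
            rw [List.cons_prefix_cons] at this
            exact hh (by rw [this.1]; rfl)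
      rw [List.filter_cons_of_neg (by simp [hh]),
        List.find?_cons_of_neg (by simp [hp]),
        ih (fun q hq => hne q (by simp [hq])) c t]

-- heads of the map keys
lemma pvHeads : ∀ p ∈ pvKeyMap,
    p.1.head? = some 'C' ∨ p.1.head? = some 'P' ∨ p.1.head? = some 'E' ∨
    p.1.head? = some 'S' ∨ p.1.head? = some 'V' ∨ p.1.head? = some 'D' ∨
    p.1.head? = some '1' ∨ p.1.head? = some 'G' ∨ p.1.head? = some 'T' := by decide

lemma pvIndexKeys : pvIndexB.keys = ['C', 'P', 'E', 'S', 'V', 'D', '1', 'G', 'T'] := by decide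

-- B's bucket lookup-and-scan at c::t finds exactly pvFirstMatch (c::t)
lemma pvBucket (c : Char) (t : List Char) :
    pvFirstMatch (c :: t) =
      ((PySem.Dict.getD pvIndexB c []).find? (fun p => p.1.toList.isPrefixOf t)).map
        (fun p => (c :: p.1.toList, p.2.toList)) := by
  unfold pvFirstMatch
  rw [pvFindFilterHead pvKeyMap (fun q hq => (pvKeysNE q hq).1) c t]
  by_cases hC : c = 'C'
  · subst hC
    rw [show pvKeyMap.filter (fun p => p.1.head? == some 'C')
        = (PySem.Dict.getD pvIndexB 'C' []).map (fun p => ('C' :: p.1.toList, p.2.toList))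
      by decide]
    rw [List.find?_map]
    congr 1
  by_cases hP : c = 'P'
  · subst hP
    rw [show pvKeyMap.filter (fun p => p.1.head? == some 'P')
        = (PySem.Dict.getD pvIndexB 'P' []).map (fun p => ('P' :: p.1.toList, p.2.toList))
      by decide]
    rw [List.find?_map]
    congr 1
  by_cases hE : c = 'E'
  · subst hE
    rw [show pvKeyMap.filter (fun p => p.1.head? == some 'E')
        = (PySem.Dict.getD pvIndexB 'E' []).map (fun p => ('E' :: p.1.toList, p.2.toList))
      by decide]
    rw [List.find?_map]
    congr 1
  by_cases hS : c = 'S'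
  · subst hS
    rw [show pvKeyMap.filter (fun p => p.1.head? == some 'S')
        = (PySem.Dict.getD pvIndexB 'S' []).map (fun p => ('S' :: p.1.toList, p.2.toList))
      by decide]
    rw [List.find?_map]
    congr 1
  by_cases hV : c = 'V'
  · subst hV
    rw [show pvKeyMap.filter (fun p => p.1.head? == some 'V')
        = (PySem.Dict.getD pvIndexB 'V' []).map (fun p => ('V' :: p.1.toList, p.2.toList))
      by decide]
    rw [List.find?_map]
    congr 1
  by_cases hD : c = 'D'
  · subst hD
    rw [show pvKeyMap.filter (fun p => p.1.head? == some 'D')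
        = (PySem.Dict.getD pvIndexB 'D' []).map (fun p => ('D' :: p.1.toList, p.2.toList))
      by decide]
    rw [List.find?_map]
    congr 1
  by_cases h1 : c = '1'
  · subst h1
    rw [show pvKeyMap.filter (fun p => p.1.head? == some '1')
        = (PySem.Dict.getD pvIndexB '1' []).map (fun p => ('1' :: p.1.toList, p.2.toList))
      by decide]
    rw [List.find?_map]
    congr 1
  by_cases hG : c = 'G'
  · subst hG
    rw [show pvKeyMap.filter (fun p => p.1.head? == some 'G')
        = (PySem.Dict.getD pvIndexB 'G' []).map (fun p => ('G' :: p.1.toList, p.2.toList))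
      by decide]
    rw [List.find?_map]
    congr 1
  by_cases hT : c = 'T'
  · subst hT
    rw [show pvKeyMap.filter (fun p => p.1.head? == some 'T')
        = (PySem.Dict.getD pvIndexB 'T' []).map (fun p => ('T' :: p.1.toList, p.2.toList))
      by decide]
    rw [List.find?_map]
    congr 1
  -- c is none of the nine first letters: no key matches and the bucket is empty
  · have hfil : pvKeyMap.filter (fun p => p.1.head? == some c) = [] := by
      rw [List.filter_eq_nil_iff]
      intro p hp
      rcases pvHeads p hp with h | h | h | h | h | h | h | h | h <;>
        · rw [h]; simp only [beq_iff_eq, Option.some.injEq]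
          first
          | exact fun e => hC e.symm | exact fun e => hP e.symm | exact fun e => hE e.symm
          | exact fun e => hS e.symm | exact fun e => hV e.symm | exact fun e => hD e.symm
          | exact fun e => h1 e.symm | exact fun e => hG e.symm | exact fun e => hT e.symm
    have hempty : PySem.Dict.getD pvIndexB c [] = [] := by
      apply PySem.Dict.getD_of_not_contains
      rw [PySem.Dict.contains_eq_decide_mem_keys, pvIndexKeys]
      simp [hC, hP, hE, hS, hV, hD, h1, hG, hT]
    rw [hfil, hempty]
    rfl

-- Source B's scan computes pvScanR given enough fuel
lemma pvScanB_eq : ∀ fuel s, s.length ≤ fuel → pvScanB fuel s = pvScanR s := by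
  intro fuel
  induction fuel with
  | zero =>
    intro s hl
    have : s = [] := List.length_eq_zero_iff.mp (Nat.le_zero.mp hl)
    subst this
    rw [pvScanR_none_nil]; rfl
  | succ n ih =>
    intro s hl
    cases s with
    | nil => rw [pvScanR_none_nil]; rfl
    | cons c t =>
      have hlt : t.length ≤ n := by simp only [List.length_cons] at hl; omega
      cases hb : (PySem.Dict.getD pvIndexB c []).find? (fun p => p.1.toList.isPrefixOf t) with
      | none =>
        have hfm : pvFirstMatch (c :: t) = none := by rw [pvBucket, hb]; rfl
        rw [pvScanR_none_cons hfm]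
        simp only [pvScanB, hb]
        rw [ih t hlt]
      | some p =>
        have hfm : pvFirstMatch (c :: t) = some (c :: p.1.toList, p.2.toList) := by
          rw [pvBucket, hb]; rfl
        rw [pvScanR_some hfm]
        simp only [pvScanB, hb, List.length_cons, List.drop_succ_cons]
        rw [ih _ (by rw [List.length_drop]; omega)]

lemma pvB_unfold (role : String) :
    abbreviate_role_alt role = String.ofList (pvRstripComma (pvScanR role.toList)) := by
  unfold abbreviate_role_alt
  rw [pvScanB_eq role.toList.length role.toList le_rfl]
  rfl

-- ===== A's fold of replaces equals the single scan away from the BAD pattern =====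

-- no nonempty suffix of v and the string a begin alike (neither is a prefix of the other)
abbrev pvCondA (v a : List Char) : Prop :=
  ∀ u ∈ v.tails, u ≠ [] → ¬ u <+: a ∧ ¬ a <+: u

def pvRES : List Char := "resident".toList
def pvVP : List Char := "Vice President".toList
def pvPresPair : List Char × List Char := ("President".toList, "Pres".toList)

-- everything needed about an earlier map entry p versus a later map entry q
abbrev pvRel (p q : List Char × List Char) : Prop :=
  pvCondA (q.1.drop 1) p.2 ∧
  (∀ i, i < q.1.length → 0 < i → ¬ p.1 <+: q.1.drop i ∧ ¬ q.1.drop i <+: p.1) ∧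
  ¬ q.1 <+: p.1 ∧
  (∀ i, i < p.2.length → ¬ q.1 <+: p.2.drop i) ∧
  (∀ i, i < p.2.length → p.2.drop i <+: q.1 →
     p.2.length - i < q.1.length ∧ pvBAD <:+: (p.1 ++ q.1.drop (p.2.length - i)) ∧
     q.1.drop (p.2.length - i) = pvRES ∧ "P".toList <:+ p.2 ∧
     (∀ r ∈ pvKeyMap, pvCondA (q.1.drop (p.2.length - i)) r.2))
@[reducible] def pvRelDec : DecidableRel pvRel := fun p q =>
  @instDecidableAnd _ _ (by unfold pvCondA; infer_instance)
    (@instDecidableAnd _ _ (by infer_instance)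
      (@instDecidableAnd _ _ (by infer_instance)
        (@instDecidableAnd _ _ (by infer_instance) (by unfold pvCondA; infer_instance))))

def pvPairDec : Decidable (List.Pairwise pvRel pvKeyMap) :=
  @List.instDecidablePairwise _ pvRel pvRelDec pvKeyMap

set_option maxHeartbeats 2000000 in
lemma pvPairwise : List.Pairwise pvRel pvKeyMap :=
  @of_decide_eq_true _ pvPairDec (by rfl)

lemma pvCondA_tail {v a : List Char} {c : Char} (h : pvCondA (c :: v) a) : pvCondA v a := by
  intro u hu hne
  exact h u (by
    rw [List.mem_tails] at hu ⊢
    exact hu.trans (List.suffix_cons c v)) hne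

lemma pvCondA_self {v a : List Char} (h : pvCondA v a) (hne : v ≠ []) :
    ¬ v <+: a ∧ ¬ a <+: v :=
  h v (by rw [List.mem_tails]) hne

-- prefix of an append: lies in the left part, or swallows it
lemma pvPrefixAppend {u x y : List Char} (h : u <+: x ++ y) :
    u <+: x ∨ (x <+: u ∧ u.drop x.length <+: y) := by
  rcases Nat.le_total u.length x.length with hle | hge
  · exact Or.inl (List.prefix_of_prefix_length_le h (List.prefix_append x y) hle)
  · right
    have hx : x <+: u :=
      List.prefix_of_prefix_length_le (List.prefix_append x y) h hge
    obtain ⟨v, rfl⟩ := hx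
    refine ⟨⟨v, rfl⟩, ?_⟩
    rw [List.drop_left]
    exact (List.prefix_append_right_inj x).mp h

-- a prefix of the OUTPUT of a one-key replace that cannot begin like the inserted text
-- was already a prefix of the input
lemma pvNoPref {old new : List Char} (hne : old ≠ []) :
    ∀ n y v, y.length ≤ n → pvCondA v new → v <+: pvRpl old new y → v <+: y := by
  intro n
  induction n with
  | zero =>
    intro y v hl _ hv
    have : y = [] := List.length_eq_zero_iff.mp (Nat.le_zero.mp hl)
    subst this
    rwa [pvRpl_nil new hne] at hv
  | succ n ih =>
    intro y v hl hc hv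
    by_cases hp : old <+: y
    · rw [pvRpl_pos new hne hp] at hv
      cases v with
      | nil => exact List.nil_prefix
      | cons d v' =>
        rcases pvPrefixAppend hv with h1 | h2
        · exact absurd h1 (pvCondA_self hc (by simp)).1
        · exact absurd h2.1 (pvCondA_self hc (by simp)).2
    · cases y with
      | nil => rwa [pvRpl_nil new hne] at hv
      | cons c t =>
        rw [pvRpl_cons_neg new hp] at hv
        cases v with
        | nil => exact List.nil_prefix
        | cons d v' =>
          rw [List.cons_prefix_cons] at hv ⊢
          refine ⟨hv.1, ?_⟩
          exact ih t v' (by simp only [List.length_cons] at hl; omega)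
            (pvCondA_tail hc) hv.2

lemma pvNoPrefList {v : List Char} :
    ∀ ps y, (∀ p ∈ ps, p.1 ≠ []) → (∀ p ∈ ps, pvCondA v p.2) →
      v <+: pvFlist ps y → v <+: y := by
  intro ps
  induction ps with
  | nil => intro y _ _ h; exact h
  | cons p ps ih =>
    intro y hne hc hv
    have h1 : v <+: pvRpl p.1 p.2 y :=
      ih _ (fun q hq => hne q (by simp [hq])) (fun q hq => hc q (by simp [hq])) hv
    exact pvNoPref (hne p (by simp)) _ _ v le_rfl (hc p (by simp)) h1

-- one-key replace distributes over ++ when no occurrence starts inside the left part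
lemma pvSplit {old : List Char} (new : List Char) :
    ∀ x y, (∀ i, i < x.length → ¬ old <+: (x ++ y).drop i) →
      pvRpl old new (x ++ y) = x ++ pvRpl old new y := by
  intro x
  induction x with
  | nil => intro y _; rfl
  | cons c x' ih =>
    intro y hocc
    have h0 : ¬ old <+: c :: (x' ++ y) := by
      have := hocc 0 (by simp)
      simpa using this
    rw [List.cons_append, pvRpl_cons_neg new h0, ih y (fun i hi => by
      have := hocc (i + 1) (by simp only [List.length_cons]; omega)
      simpa using this)]
    simp

lemma pvFlistNil {ps : List (List Char × List Char)} (hne : ∀ p ∈ ps, p.1 ≠ []) :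
    pvFlist ps [] = [] := by
  induction ps with
  | nil => rfl
  | cons p ps ih =>
    unfold pvFlist
    simp only [List.foldl_cons]
    rw [pvRpl_nil p.2 (hne p (by simp))]
    exact ih (fun q hq => hne q (by simp [hq]))

-- passes of earlier keys leave a leading later-key occurrence km untouched
lemma pvEarlier {km : List Char} :
    ∀ P y,
      (∀ p ∈ P, p.1 ≠ [] ∧ ¬ p.1 <+: km ∧ ¬ km <+: p.1 ∧
        (∀ i, i < km.length → 0 < i → ¬ p.1 <+: km.drop i ∧ ¬ km.drop i <+: p.1)) →
      pvFlist P (km ++ y) = km ++ pvFlist P y := by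
  intro P
  induction P with
  | nil => intro y _; rfl
  | cons p P ih =>
    intro y hp
    obtain ⟨hne, hnp, hnk, hstr⟩ := hp p (by simp)
    unfold pvFlist
    simp only [List.foldl_cons]
    have hsplit : pvRpl p.1 p.2 (km ++ y) = km ++ pvRpl p.1 p.2 y := by
      apply pvSplit p.2
      intro i hi hpre
      have hdrop : (km ++ y).drop i = km.drop i ++ y := by
        rw [List.drop_append]
        have : i - km.length = 0 := by omega
        rw [this, List.drop_zero]
      rw [hdrop] at hpre
      rcases pvPrefixAppend hpre with h1 | h2
      · rcases Nat.eq_zero_or_pos i with rfl | hpos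
        · exact hnp (by simpa using h1)
        · exact (hstr i hi hpos).1 h1
      · rcases Nat.eq_zero_or_pos i with rfl | hpos
        · exact hnk (by simpa using h2.1)
        · exact (hstr i hi hpos).2 h2.1
    rw [hsplit]
    exact ih _ (fun q hq => hp q (by simp [hq]))

-- passes of later keys leave an inserted block am untouched,
-- unless a crossing occurrence is enabled by y (excluded via the last hypothesis)
lemma pvLater (am : List Char) :
    ∀ S y,
      (∀ q ∈ S, q ∈ pvKeyMap) →
      (∀ q ∈ S, ∀ i, i < am.length → ¬ q.1 <+: am.drop i) →
      (∀ q ∈ S, ∀ i, i < am.length → am.drop i <+: q.1 →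
          am.length - i < q.1.length ∧
          (∀ r ∈ pvKeyMap, pvCondA (q.1.drop (am.length - i)) r.2)) →
      (∀ q ∈ S, ∀ i, i < am.length → am.drop i <+: q.1 →
          ¬ q.1.drop (am.length - i) <+: y) →
      pvFlist S (am ++ y) = am ++ pvFlist S y := by
  intro S
  induction S with
  | nil => intro y _ _ _ _; rfl
  | cons q S ih =>
    intro y hK hd he hw
    have hqne : q.1 ≠ [] := (pvKeysNE q (hK q (by simp))).1
    unfold pvFlist
    simp only [List.foldl_cons]
    have hsplit : pvRpl q.1 q.2 (am ++ y) = am ++ pvRpl q.1 q.2 y := by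
      apply pvSplit q.2
      intro i hi hpre
      have hdrop : (am ++ y).drop i = am.drop i ++ y := by
        rw [List.drop_append]
        have : i - am.length = 0 := by omega
        rw [this, List.drop_zero]
      rw [hdrop] at hpre
      rcases pvPrefixAppend hpre with h1 | h2
      · exact hd q (by simp) i hi h1
      · obtain ⟨hx, hy⟩ := h2
        rw [List.length_drop] at hy
        exact hw q (by simp) i hi hx hy
    rw [hsplit]
    apply ih (pvRpl q.1 q.2 y) (fun r hr => hK r (by simp [hr]))
      (fun r hr => hd r (by simp [hr])) (fun r hr => he r (by simp [hr]))
    intro q' hq' i hi hx hwpre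
    have hcall := (he q' (by simp [hq']) i hi hx).2
    have hw' : q'.1.drop (am.length - i) <+: y :=
      pvNoPref hqne _ _ _ le_rfl (hcall q (hK q (by simp))) hwpre
    exact hw q' (by simp [hq']) i hi hx hw'

-- a head position where no key matches survives all passes
lemma pvN1 :
    ∀ ps (c : Char) t,
      (∀ p ∈ ps, p.1 ≠ []) →
      List.Pairwise (fun p q => pvCondA (q.1.drop 1) p.2) ps →
      (∀ p ∈ ps, ¬ p.1 <+: c :: t) →
      pvFlist ps (c :: t) = c :: pvFlist ps t := by
  intro ps
  induction ps with
  | nil => intro c t _ _ _; rfl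
  | cons p ps ih =>
    intro c t hne hpw hall
    have hpw' := (List.pairwise_cons.mp hpw)
    unfold pvFlist
    simp only [List.foldl_cons]
    rw [pvRpl_cons_neg p.2 (hall p (by simp))]
    have hall' : ∀ q ∈ ps, ¬ q.1 <+: c :: pvRpl p.1 p.2 t := by
      intro q hq hqpre
      have hqne : q.1 ≠ [] := hne q (by simp [hq])
      cases hq1 : q.1 with
      | nil => exact hqne hq1
      | cons d v =>
        rw [hq1, List.cons_prefix_cons] at hqpre
        have hcv : pvCondA v p.2 := by
          have := hpw'.1 q hq
          rwa [hq1] at this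
        have hvt : v <+: t :=
          pvNoPref (hne p (by simp)) _ _ _ le_rfl hcv hqpre.2
        exact hall q (by simp [hq]) (by rw [hq1, List.cons_prefix_cons]; exact ⟨hqpre.1, hvt⟩)
    exact ih c (pvRpl p.1 p.2 t) (fun q hq => hne q (by simp [hq])) hpw'.2 hall'

lemma pvCaseI {p : List Char × List Char} {R : List Char}
    (h : pvFirstMatch (p.1 ++ R) = some p)
    (hcase : ¬ ("P".toList <:+ p.2 ∧ pvRES <+: R)) :
    pvFlist pvKeyMap (p.1 ++ R) = p.2 ++ pvFlist pvKeyMap R := by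
  obtain ⟨hmem, hne, -⟩ := pvFirstMatch_some_facts h
  obtain ⟨hp1, P, S, hKeq, hPf⟩ := List.find?_eq_some_iff_append.mp h
  have hPfalse : ∀ a ∈ P, ¬ a.1 <+: (p.1 ++ R) := by
    intro a ha hpre'
    have h2 := hPf a ha
    simp only [List.isPrefixOf_iff_prefix.mpr hpre'] at h2
    simp at h2
  have hpw : List.Pairwise pvRel (P ++ p :: S) := hKeq ▸ pvPairwise
  rw [List.pairwise_append] at hpw
  obtain ⟨hpwP, hpwPS, hcross⟩ := hpw
  have hpS := List.pairwise_cons.mp hpwPS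
  have hPK : ∀ a ∈ P, a ∈ pvKeyMap := by
    intro a ha; rw [hKeq]; exact List.mem_append_left _ ha
  have hSK : ∀ q ∈ S, q ∈ pvKeyMap := by
    intro q hq; rw [hKeq]; exact List.mem_append_right _ (by simp [hq])
  -- earlier passes
  have e2 : pvFlist P (p.1 ++ R) = p.1 ++ pvFlist P R := by
    apply pvEarlier P R
    intro a ha
    have hrel := hcross a ha p (by simp)
    refine ⟨(pvKeysNE a (hPK a ha)).1, ?_, hrel.2.2.1, fun i hi hpos => hrel.2.1 i hi hpos⟩
    exact fun hp' => hPfalse a ha (hp'.trans (List.prefix_append p.1 R))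
  -- the pass of p itself
  have e4 : pvRpl p.1 p.2 (pvFlist P R) = pvFlist (P ++ [p]) R := by
    unfold pvFlist
    rw [List.foldl_append]
    rfl
  -- later passes
  have hLat : pvFlist S (p.2 ++ pvFlist (P ++ [p]) R)
      = p.2 ++ pvFlist S (pvFlist (P ++ [p]) R) := by
    apply pvLater p.2 S _ hSK
      (fun q hq i hi => (hpS.1 q hq).2.2.2.1 i hi)
      (fun q hq i hi hx => ⟨((hpS.1 q hq).2.2.2.2 i hi hx).1,
        ((hpS.1 q hq).2.2.2.2 i hi hx).2.2.2.2⟩)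
    intro q hq i hi hx hwpre
    have he := (hpS.1 q hq).2.2.2.2 i hi hx
    have hwR : q.1.drop (p.2.length - i) <+: R := by
      apply pvNoPrefList (P ++ [p]) R
      · intro a ha
        rcases List.mem_append.mp ha with haP | hap
        · exact (pvKeysNE a (hPK a haP)).1
        · simp at hap; subst hap; exact hne
      · intro a ha
        rcases List.mem_append.mp ha with haP | hap
        · exact he.2.2.2.2 a (hPK a haP)
        · simp at hap; subst hap; exact he.2.2.2.2 _ hmem
      · exact hwpre
    exact hcase ⟨he.2.2.2.1, he.2.2.1 ▸ hwR⟩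
  calc pvFlist pvKeyMap (p.1 ++ R)
      = pvFlist (p :: S) (pvFlist P (p.1 ++ R)) := by
        rw [hKeq]; unfold pvFlist; rw [List.foldl_append]
    _ = pvFlist (p :: S) (p.1 ++ pvFlist P R) := by rw [e2]
    _ = pvFlist S (p.2 ++ pvRpl p.1 p.2 (pvFlist P R)) := by
        unfold pvFlist
        simp only [List.foldl_cons]
        rw [pvRpl_pos p.2 hne (List.prefix_append _ _), List.drop_left]
    _ = pvFlist S (p.2 ++ pvFlist (P ++ [p]) R) := by rw [e4]
    _ = p.2 ++ pvFlist S (pvFlist (P ++ [p]) R) := hLat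
    _ = p.2 ++ pvFlist pvKeyMap R := by
        rw [hKeq]; unfold pvFlist
        rw [List.foldl_append, List.foldl_append, List.foldl_cons]
        rfl

lemma pvF5 : ∀ q ∈ pvKeyMap, "P".toList <:+ q.2 → pvVP <:+ q.1 := by decide

lemma pvVPRES : pvVP ++ pvRES = pvBAD := by decide

lemma pvMaster : ∀ n s, s.length ≤ n → ¬ pvBAD <:+: s →
    pvFlist pvKeyMap s = pvScanR s := by
  intro n
  induction n with
  | zero =>
    intro s hl _
    have : s = [] := List.length_eq_zero_iff.mp (Nat.le_zero.mp hl)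
    subst this
    rw [pvFlistNil (fun q hq => (pvKeysNE q hq).1), pvScanR_none_nil]
  | succ n ih =>
    intro s hl hb
    cases h : pvFirstMatch s with
    | none =>
      have hall : ∀ q ∈ pvKeyMap, ¬ q.1 <+: s := by
        intro q hq hpre
        exact List.find?_eq_none.mp h q hq (List.isPrefixOf_iff_prefix.mpr hpre)
      cases s with
      | nil => rw [pvFlistNil (fun q hq => (pvKeysNE q hq).1), pvScanR_none_nil]
      | cons c t =>
        have hT := ih t (by simp only [List.length_cons] at hl; omega)
          (fun hbt => hb (hbt.trans (List.suffix_cons c t).isInfix))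
        rw [pvN1 pvKeyMap c t (fun q hq => (pvKeysNE q hq).1)
            (pvPairwise.imp (fun hr => hr.1)) hall, hT, pvScanR_none_cons h]
    | some p =>
      obtain ⟨hmem, hne, hpre⟩ := pvFirstMatch_some_facts h
      obtain ⟨R, rfl⟩ := hpre
      have hcase : ¬ ("P".toList <:+ p.2 ∧ pvRES <+: R) := by
        rintro ⟨hP, hres⟩
        obtain ⟨u, hu⟩ := pvF5 p hmem hP
        obtain ⟨R', hR'⟩ := hres
        apply hb
        refine ⟨u, R', ?_⟩
        rw [← pvVPRES, ← hu, ← hR']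
        simp
      have hlenR : R.length ≤ n := by
        have h2 : 0 < p.1.length := List.length_pos_iff.mpr hne
        simp only [List.length_append] at hl
        omega
      have hbR : ¬ pvBAD <:+: R :=
        fun hh => hb (hh.trans (List.suffix_append p.1 R).isInfix)
      rw [pvCaseI h hcase, ih R hlenR hbR, pvScanR_some h, List.drop_left]


-- ===== tightness: A and B really differ on every input containing the pattern =====

lemma pvPrefixLong {u x z : List Char} (hlen : u.length ≤ x.length) :
    u <+: x ++ z ↔ u <+: x := by
  constructor
  · intro h
    rcases pvPrefixAppend h with h1 | h2
    · exact h1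
    · rw [h2.1.eq_of_length_le hlen]
  · exact fun h => h.trans (List.prefix_append x z)

lemma pvFirstMatch_none_of_head {c : Char} (t : List Char)
    (hc : ∀ p ∈ pvKeyMap, p.1.head? ≠ some c) : pvFirstMatch (c :: t) = none := by
  apply List.find?_eq_none.mpr
  intro q hq
  simp only [Bool.not_eq_true]
  cases hpre : q.1.isPrefixOf (c :: t)
  · rfl
  · exfalso
    have hp := List.isPrefixOf_iff_prefix.mp hpre
    cases hq1 : q.1 with
    | nil => exact (pvKeysNE q hq).1 hq1
    | cons d tl =>
      rw [hq1, List.cons_prefix_cons] at hp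
      exact hc q hq (by rw [hq1, hp.1]; rfl)

lemma pvScanWord : ∀ w z, (∀ c ∈ w, ∀ p ∈ pvKeyMap, p.1.head? ≠ some c) →
    pvScanR (w ++ z) = w ++ pvScanR z := by
  intro w
  induction w with
  | nil => intro z _; rfl
  | cons c w' ih =>
    intro z hw
    rw [List.cons_append,
      pvScanR_none_cons (pvFirstMatch_none_of_head _ (fun p hp => hw c (by simp) p hp)),
      ih z (fun d hd p hp => hw d (by simp [hd]) p hp)]
    simp

lemma pvFoldWord (ps : List (List Char × List Char)) (hne : ∀ p ∈ ps, p.1 ≠ [])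
    (hpw : List.Pairwise (fun p q => pvCondA (q.1.drop 1) p.2) ps)
    (hsub : ∀ p ∈ ps, p ∈ pvKeyMap) :
    ∀ w z, (∀ c ∈ w, ∀ p ∈ pvKeyMap, p.1.head? ≠ some c) →
      pvFlist ps (w ++ z) = w ++ pvFlist ps z := by
  intro w
  induction w with
  | nil => intro z _; rfl
  | cons c w' ih =>
    intro z hw
    have hall : ∀ p ∈ ps, ¬ p.1 <+: c :: (w' ++ z) := by
      intro p hp hpre
      cases hq1 : p.1 with
      | nil => exact (hne p hp) hq1
      | cons d tl =>
        rw [hq1, List.cons_prefix_cons] at hpre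
        exact hw c (by simp) p (hsub p hp) (by rw [hq1, hpre.1]; rfl)
    rw [List.cons_append, pvN1 ps c (w' ++ z) hne hpw hall,
      ih z (fun d hd p hp => hw d (by simp [hd]) p hp)]
    rfl

lemma pvResHead : ∀ c ∈ pvRES, ∀ p ∈ pvKeyMap, p.1.head? ≠ some c := by
  have hb : (pvRES.all (fun c => pvKeyMap.all (fun p => !(p.1.head? == some c)))) = true := by
    rfl
  intro c hc p hp
  have h1 := List.all_eq_true.mp hb c hc
  have h2 := List.all_eq_true.mp h1 p hp
  simpa using h2

lemma pvSplitUnique {α : Type} [DecidableEq α] : ∀ (P P' : List α) {S S' : List α} {p : α},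
    P ++ p :: S = P' ++ p :: S' → p ∉ P → p ∉ P' → P = P' ∧ S = S' := by
  intro P
  induction P with
  | nil =>
    intro P' S S' p h hp hp'
    cases P' with
    | nil => simpa using h
    | cons b P'' =>
      simp only [List.nil_append, List.cons_append, List.cons.injEq] at h
      exact absurd (by simp [h.1]) hp'
  | cons a P₁ ih =>
    intro P' S S' p h hp hp'
    cases P' with
    | nil =>
      simp only [List.cons_append, List.nil_append, List.cons.injEq] at h
      exact absurd (by simp [← h.1]) hp
    | cons b P₂ =>
      simp only [List.cons_append, List.cons.injEq] at h
      obtain ⟨rfl, h2⟩ := h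
      have hr := ih P₂ h2 (fun hh => hp (by simp [hh])) (fun hh => hp' (by simp [hh]))
      exact ⟨by rw [hr.1], hr.2⟩

lemma pvNodup : pvKeyMap.Nodup := by decide

set_option maxRecDepth 8000 in
lemma pvF1 : ∀ q ∈ pvKeyMap, ∀ j, j < q.1.length →
    ((q.1.drop j <+: pvBAD → q.1.drop j = pvVP) ∧ ¬ pvBAD <+: q.1.drop j) := by decide

lemma pvF6 : ∀ q ∈ pvKeyMap, pvVP <:+ q.1 → "P".toList <:+ q.2 := by decide

lemma pvF4 : ∀ q ∈ pvKeyMap, "P".toList <:+ q.2 →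
    q = ("Executive Vice President".toList, "EVP".toList) ∨
    q = ("Senior Vice President".toList, "SVP".toList) ∨
    q = ("Vice President".toList, "VP".toList) := by decide

-- where a BAD occurrence can sit relative to a leading key occurrence
lemma pvBadSplit {p : List Char × List Char} {R : List Char} (hmem : p ∈ pvKeyMap)
    (hb : pvBAD <:+: (p.1 ++ R))
    (hcase : ¬ ("P".toList <:+ p.2 ∧ pvRES <+: R)) :
    pvBAD <:+: R := by
  obtain ⟨u, v, hs⟩ := hb
  have hu : u <+: p.1 ++ R := ⟨pvBAD ++ v, by simpa [List.append_assoc] using hs⟩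
  rcases Nat.le_total p.1.length u.length with hle | hge
  · have h1 : p.1 <+: u :=
      List.prefix_of_prefix_length_le (List.prefix_append p.1 R) hu hle
    obtain ⟨u', rfl⟩ := h1
    refine ⟨u', v, ?_⟩
    have hs' : p.1 ++ (u' ++ (pvBAD ++ v)) = p.1 ++ R := by
      simpa [List.append_assoc] using hs
    have hc := List.append_cancel_left hs'
    simpa [List.append_assoc] using hc
  · have h1 : u <+: p.1 :=
      List.prefix_of_prefix_length_le hu (List.prefix_append p.1 R) hge
    obtain ⟨w₀, hw0eq⟩ := h1
    have h2 : pvBAD ++ v = w₀ ++ R := by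
      apply List.append_cancel_left (as := u)
      have hs' : u ++ (pvBAD ++ v) = p.1 ++ R := by
        simpa [List.append_assoc] using hs
      rw [hs', ← hw0eq, List.append_assoc]
    by_cases hw0 : w₀ = []
    · subst hw0
      exact ⟨[], v, by simpa using h2⟩
    · have hj : u.length < p.1.length := by
        rw [← hw0eq]
        simp only [List.length_append]
        have := List.length_pos_iff.mpr hw0
        omega
      have hF := pvF1 p hmem u.length hj
      have hdrop : p.1.drop u.length = w₀ := by
        rw [← hw0eq]; exact List.drop_left
      rw [hdrop] at hF
      have h3 : w₀ <+: pvBAD ++ v := ⟨R, h2.symm⟩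
      rcases pvPrefixAppend h3 with hA | hB
      · have hVP : w₀ = pvVP := hF.1 hA
        subst hVP
        rw [← pvVPRES, List.append_assoc] at h2
        have h4 := List.append_cancel_left h2
        exact absurd ⟨pvF6 p hmem ⟨u, hw0eq⟩, ⟨v, h4⟩⟩ hcase
      · exact absurd hB.1 hF.2

-- case (ii): the cascade site, computed exactly
lemma pvCaseIIFull (p : List Char × List Char) (P S1 S2 : List (List Char × List Char))
    (w : List Char)
    (hK : pvKeyMap = P ++ p :: (S1 ++ pvPresPair :: S2))
    (habbr : p.2 = w ++ ['P'])
    (hwP : ∀ i, i < w.length → ¬ pvPresPair.1 <+: (w.drop i ++ pvPresPair.1))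
    (hS1cross : ∀ q ∈ S1, ∀ i, i < p.2.length → ¬ p.2.drop i <+: q.1)
    (hS2hd : ∀ q ∈ S2, ∀ i, i < (w ++ pvPresPair.2).length →
      ¬ q.1 <+: (w ++ pvPresPair.2).drop i)
    (hS2cr : ∀ q ∈ S2, ∀ i, i < (w ++ pvPresPair.2).length →
      ¬ (w ++ pvPresPair.2).drop i <+: q.1)
    {R' : List Char}
    (hPfalse : ∀ a ∈ P, ¬ a.1 <+: (p.1 ++ (pvRES ++ R'))) :
    pvFlist pvKeyMap (p.1 ++ (pvRES ++ R')) = w ++ pvPresPair.2 ++ pvFlist pvKeyMap R' := by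
  have hmem : p ∈ pvKeyMap := by
    rw [hK]; exact List.mem_append_right _ (by simp)
  have hne : p.1 ≠ [] := (pvKeysNE p hmem).1
  have hpw : List.Pairwise pvRel (P ++ p :: (S1 ++ pvPresPair :: S2)) := hK ▸ pvPairwise
  rw [List.pairwise_append] at hpw
  obtain ⟨hpwP, hpwPS, hcross⟩ := hpw
  have hpS := List.pairwise_cons.mp hpwPS
  have hPK : ∀ a ∈ P, a ∈ pvKeyMap := by
    intro a ha; rw [hK]; exact List.mem_append_left _ ha
  have hSK : ∀ q ∈ S1 ++ pvPresPair :: S2, q ∈ pvKeyMap := by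
    intro q hq; rw [hK]; exact List.mem_append_right _ (by simp [hq])
  have hS1K : ∀ q ∈ S1, q ∈ pvKeyMap :=
    fun q hq => hSK q (List.mem_append_left _ hq)
  have hS2K : ∀ q ∈ S2, q ∈ pvKeyMap :=
    fun q hq => hSK q (List.mem_append_right _ (by simp [hq]))
  -- earlier passes split off the head key occurrence
  have e2 : pvFlist P (p.1 ++ (pvRES ++ R')) = p.1 ++ pvFlist P (pvRES ++ R') := by
    apply pvEarlier P (pvRES ++ R')
    intro a ha
    have hrel := hcross a ha p (by simp)
    refine ⟨(pvKeysNE a (hPK a ha)).1, ?_, hrel.2.2.1, fun i hi hpos => hrel.2.1 i hi hpos⟩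
    exact fun hp' => hPfalse a ha (hp'.trans (List.prefix_append _ _))
  have e4 : pvRpl p.1 p.2 (pvFlist P (pvRES ++ R')) = pvFlist (P ++ [p]) (pvRES ++ R') := by
    unfold pvFlist; rw [List.foldl_append]; rfl
  have e4' : pvRpl p.1 p.2 (pvFlist P R') = pvFlist (P ++ [p]) R' := by
    unfold pvFlist; rw [List.foldl_append]; rfl
  -- 'resident' passes through every pass unchanged
  have hsubPp : ∀ a ∈ P ++ [p], a ∈ pvKeyMap := by
    intro a ha
    rcases List.mem_append.mp ha with h1 | h1
    · exact hPK a h1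
    · simp at h1; subst h1; exact hmem
  have hslPp : (P ++ [p]).Sublist pvKeyMap := by
    rw [hK]
    apply List.Sublist.append_left
    exact List.cons_sublist_cons.mpr (List.nil_sublist _)
  have hpwPp : List.Pairwise (fun a b => pvCondA (b.1.drop 1) a.2) (P ++ [p]) :=
    (pvPairwise.sublist hslPp).imp (fun hr => hr.1)
  have hnePp : ∀ a ∈ P ++ [p], a.1 ≠ [] := fun a ha => (pvKeysNE a (hsubPp a ha)).1
  have eZ : pvFlist (P ++ [p]) (pvRES ++ R') = pvRES ++ pvFlist (P ++ [p]) R' :=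
    pvFoldWord _ hnePp hpwPp hsubPp pvRES R' pvResHead
  have hslS1 : S1.Sublist pvKeyMap := by
    rw [hK]
    apply List.Sublist.trans (l₂ := S1 ++ pvPresPair :: S2)
    · exact List.sublist_append_left _ _
    · apply List.Sublist.trans (l₂ := p :: (S1 ++ pvPresPair :: S2))
      · exact List.sublist_cons_self _ _
      · exact List.sublist_append_right _ _
  have hpwS1 : List.Pairwise (fun a b => pvCondA (b.1.drop 1) a.2) S1 :=
    (pvPairwise.sublist hslS1).imp (fun hr => hr.1)
  have hneS1 : ∀ a ∈ S1, a.1 ≠ [] := fun a ha => (pvKeysNE a (hS1K a ha)).1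
  have eS1w : ∀ X, pvFlist S1 (pvRES ++ X) = pvRES ++ pvFlist S1 X :=
    fun X => pvFoldWord _ hneS1 hpwS1 hS1K pvRES X pvResHead
  have hrelS1 : ∀ q ∈ S1, pvRel p q :=
    fun q hq => hpS.1 q (List.mem_append_left _ hq)
  have hS1later : ∀ Y, pvFlist S1 (p.2 ++ Y) = p.2 ++ pvFlist S1 Y := by
    intro Y
    exact pvLater p.2 S1 Y hS1K
      (fun q hq i hi => (hrelS1 q hq).2.2.2.1 i hi)
      (fun q hq i hi hx => absurd hx (hS1cross q hq i hi))
      (fun q hq i hi hx => absurd hx (hS1cross q hq i hi))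
  have hPKne : pvPresPair.1 ≠ [] := by decide
  have hPconcat : ('P' :: pvRES) = pvPresPair.1 := by decide
  have hpres : ∀ X, pvRpl pvPresPair.1 pvPresPair.2 (p.2 ++ (pvRES ++ X))
      = (w ++ pvPresPair.2) ++ pvRpl pvPresPair.1 pvPresPair.2 X := by
    intro X
    have hre : p.2 ++ (pvRES ++ X) = w ++ (pvPresPair.1 ++ X) := by
      rw [habbr, ← hPconcat]; simp
    rw [hre]
    rw [pvSplit pvPresPair.2 w (pvPresPair.1 ++ X) ?hocc]
    · rw [pvRpl_pos pvPresPair.2 hPKne (List.prefix_append _ _), List.drop_left]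
      simp
    case hocc =>
      intro i hi hpre2
      have hdrop : (w ++ (pvPresPair.1 ++ X)).drop i = w.drop i ++ (pvPresPair.1 ++ X) := by
        rw [List.drop_append]
        have : i - w.length = 0 := by omega
        rw [this, List.drop_zero]
      rw [hdrop, ← List.append_assoc] at hpre2
      rw [pvPrefixLong (by simp)] at hpre2
      exact hwP i hi hpre2
  have hS2later : ∀ Y, pvFlist S2 ((w ++ pvPresPair.2) ++ Y)
      = (w ++ pvPresPair.2) ++ pvFlist S2 Y := by
    intro Y
    exact pvLater (w ++ pvPresPair.2) S2 Y hS2K hS2hd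
      (fun q hq i hi hx => absurd hx (hS2cr q hq i hi))
      (fun q hq i hi hx => absurd hx (hS2cr q hq i hi))
  calc pvFlist pvKeyMap (p.1 ++ (pvRES ++ R'))
      = pvFlist (p :: (S1 ++ pvPresPair :: S2)) (pvFlist P (p.1 ++ (pvRES ++ R'))) := by
        rw [hK]; unfold pvFlist; rw [List.foldl_append]
    _ = pvFlist (S1 ++ pvPresPair :: S2)
          (pvRpl p.1 p.2 (p.1 ++ pvFlist P (pvRES ++ R'))) := by
        rw [e2]; rfl
    _ = pvFlist (S1 ++ pvPresPair :: S2) (p.2 ++ (pvRES ++ pvFlist (P ++ [p]) R')) := by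
        rw [pvRpl_pos p.2 hne (List.prefix_append _ _), List.drop_left, e4, eZ]
    _ = pvFlist (pvPresPair :: S2) (pvFlist S1 (p.2 ++ (pvRES ++ pvFlist (P ++ [p]) R'))) := by
        unfold pvFlist; rw [List.foldl_append]
    _ = pvFlist (pvPresPair :: S2)
          (p.2 ++ (pvRES ++ pvFlist S1 (pvFlist (P ++ [p]) R'))) := by
        rw [hS1later, eS1w]
    _ = pvFlist S2 (pvRpl pvPresPair.1 pvPresPair.2
          (p.2 ++ (pvRES ++ pvFlist S1 (pvFlist (P ++ [p]) R')))) := rfl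
    _ = pvFlist S2 ((w ++ pvPresPair.2) ++
          pvRpl pvPresPair.1 pvPresPair.2 (pvFlist S1 (pvFlist (P ++ [p]) R'))) := by
        rw [hpres]
    _ = (w ++ pvPresPair.2) ++
          pvFlist S2 (pvRpl pvPresPair.1 pvPresPair.2
            (pvFlist S1 (pvFlist (P ++ [p]) R'))) := hS2later _
    _ = (w ++ pvPresPair.2) ++ pvFlist (S1 ++ pvPresPair :: S2) (pvFlist (P ++ [p]) R') := by
        unfold pvFlist
        conv_rhs => rw [List.foldl_append, List.foldl_cons]
    _ = w ++ pvPresPair.2 ++ pvFlist pvKeyMap R' := by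
        rw [hK, ← e4']; unfold pvFlist
        conv_rhs => rw [List.foldl_append, List.foldl_cons]

def pvNcc (l : List Char) : Nat := l.countP (fun c => !(c == ','))

lemma pvNcc_append (x y : List Char) : pvNcc (x ++ y) = pvNcc x + pvNcc y :=
  List.countP_append

lemma pvCaseIIWrap {p : List Char × List Char} {R' : List Char}
    (h : pvFirstMatch (p.1 ++ (pvRES ++ R')) = some p)
    (hP : "P".toList <:+ p.2) :
    ∃ w, p.2 = w ++ ['P'] ∧
      pvFlist pvKeyMap (p.1 ++ (pvRES ++ R'))
        = w ++ pvPresPair.2 ++ pvFlist pvKeyMap R' := by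
  obtain ⟨hmem, -, -⟩ := pvFirstMatch_some_facts h
  obtain ⟨hp1, P, S, hKeq, hPf⟩ := List.find?_eq_some_iff_append.mp h
  have hPfalse : ∀ a ∈ P, ¬ a.1 <+: (p.1 ++ (pvRES ++ R')) := by
    intro a ha hpre'
    have h2 := hPf a ha
    simp only [List.isPrefixOf_iff_prefix.mpr hpre'] at h2
    simp at h2
  have hpP : p ∉ P := by
    have hnd := hKeq ▸ pvNodup
    rw [List.nodup_middle, List.nodup_cons] at hnd
    exact fun hm => hnd.1 (List.mem_append_left _ hm)
  rcases pvF4 p hmem hP with h4 | h4 | h4 <;> subst h4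
  · have hlit : pvKeyMap = pvKeyMap.take 8 ++ ("Executive Vice President".toList, "EVP".toList) :: ([("Senior Vice President".toList, "SVP".toList),
         ("Vice President".toList, "VP".toList),
         ("Director".toList, "Dir".toList),
         ("10% Owner".toList, "10%".toList),
         ("General Counsel".toList, "GC".toList)] ++ pvPresPair :: [("Secretary".toList, "Sec".toList), ("Treasurer".toList, "Treas".toList)]) := by decide
    have hPeq := (pvSplitUnique P (pvKeyMap.take 8) (hKeq.symm.trans hlit) hpP (by decide)).1
    rw [hPeq] at hPfalse
    exact ⟨"EV".toList, by decide,
      pvCaseIIFull _ (pvKeyMap.take 8)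
        [("Senior Vice President".toList, "SVP".toList),
         ("Vice President".toList, "VP".toList),
         ("Director".toList, "Dir".toList),
         ("10% Owner".toList, "10%".toList),
         ("General Counsel".toList, "GC".toList)]
        [("Secretary".toList, "Sec".toList), ("Treasurer".toList, "Treas".toList)]
        ("EV".toList) hlit (by decide) (by decide) (by decide) (by decide) (by decide)
        hPfalse⟩
  · have hlit : pvKeyMap = pvKeyMap.take 9 ++ ("Senior Vice President".toList, "SVP".toList) :: ([("Vice President".toList, "VP".toList),
         ("Director".toList, "Dir".toList),
         ("10% Owner".toList, "10%".toList),
         ("General Counsel".toList, "GC".toList)] ++ pvPresPair :: [("Secretary".toList, "Sec".toList), ("Treasurer".toList, "Treas".toList)]) := by decide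
    have hPeq := (pvSplitUnique P (pvKeyMap.take 9) (hKeq.symm.trans hlit) hpP (by decide)).1
    rw [hPeq] at hPfalse
    exact ⟨"SV".toList, by decide,
      pvCaseIIFull _ (pvKeyMap.take 9)
        [("Vice President".toList, "VP".toList),
         ("Director".toList, "Dir".toList),
         ("10% Owner".toList, "10%".toList),
         ("General Counsel".toList, "GC".toList)]
        [("Secretary".toList, "Sec".toList), ("Treasurer".toList, "Treas".toList)]
        ("SV".toList) hlit (by decide) (by decide) (by decide) (by decide) (by decide)
        hPfalse⟩
  · have hlit : pvKeyMap = pvKeyMap.take 10 ++ ("Vice President".toList, "VP".toList) :: ([("Director".toList, "Dir".toList),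
         ("10% Owner".toList, "10%".toList),
         ("General Counsel".toList, "GC".toList)] ++ pvPresPair :: [("Secretary".toList, "Sec".toList), ("Treasurer".toList, "Treas".toList)]) := by decide
    have hPeq := (pvSplitUnique P (pvKeyMap.take 10) (hKeq.symm.trans hlit) hpP (by decide)).1
    rw [hPeq] at hPfalse
    exact ⟨"V".toList, by decide,
      pvCaseIIFull _ (pvKeyMap.take 10)
        [("Director".toList, "Dir".toList),
         ("10% Owner".toList, "10%".toList),
         ("General Counsel".toList, "GC".toList)]
        [("Secretary".toList, "Sec".toList), ("Treasurer".toList, "Treas".toList)]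
        ("V".toList) hlit (by decide) (by decide) (by decide) (by decide) (by decide)
        hPfalse⟩

lemma pvNccRstrip (x : List Char) : pvNcc (pvRstripComma x) = pvNcc x := by
  unfold pvRstripComma pvNcc
  rw [List.countP_reverse]
  conv_rhs => rw [← List.countP_reverse,
    ← List.takeWhile_append_dropWhile (p := fun c => c == ',') (l := x.reverse)]
  rw [List.countP_append]
  have hz : (x.reverse.takeWhile (fun c => c == ',')).countP (fun c => !(c == ',')) = 0 := by
    apply List.countP_eq_zero.mpr
    intro a ha
    have := List.mem_takeWhile_imp ha
    simp at this ⊢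
    exact this
  omega

lemma pvTight : ∀ n s, s.length ≤ n →
    pvNcc (pvFlist pvKeyMap s) ≤ pvNcc (pvScanR s) ∧
      (pvBAD <:+: s → pvNcc (pvFlist pvKeyMap s) < pvNcc (pvScanR s)) := by
  intro n
  induction n with
  | zero =>
    intro s hl
    have : s = [] := List.length_eq_zero_iff.mp (Nat.le_zero.mp hl)
    subst this
    rw [pvFlistNil (fun q hq => (pvKeysNE q hq).1), pvScanR_none_nil]
    exact ⟨le_rfl, fun hb => absurd hb (by decide)⟩
  | succ n ih =>
    intro s hl
    cases h : pvFirstMatch s with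
    | none =>
      have hall : ∀ q ∈ pvKeyMap, ¬ q.1 <+: s := by
        intro q hq hpre
        exact List.find?_eq_none.mp h q hq (List.isPrefixOf_iff_prefix.mpr hpre)
      cases s with
      | nil =>
        rw [pvFlistNil (fun q hq => (pvKeysNE q hq).1), pvScanR_none_nil]
        exact ⟨le_rfl, fun hb => absurd hb (by decide)⟩
      | cons c t =>
        have iht := ih t (by simp only [List.length_cons] at hl; omega)
        rw [pvN1 pvKeyMap c t (fun q hq => (pvKeysNE q hq).1)
            (pvPairwise.imp (fun hr => hr.1)) hall, pvScanR_none_cons h]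
        have hcc : ∀ y : List Char, pvNcc (c :: y)
            = pvNcc y + (if (!(c == ',')) = true then 1 else 0) := by
          intro y; unfold pvNcc; rw [List.countP_cons]
        rw [hcc, hcc]
        refine ⟨by have := iht.1; omega, ?_⟩
        intro hb
        have hbt : pvBAD <:+: t := by
          rcases List.infix_cons_iff.mp hb with hpre | hinf
          · exfalso
            have hVPpre : ("Vice President".toList) <+: pvBAD := by decide
            have hVPmem : ("Vice President".toList, "VP".toList) ∈ pvKeyMap := by decide
            exact hall _ hVPmem (hVPpre.trans hpre)
          · exact hinf
        have := iht.2 hbt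
        omega
    | some p =>
      obtain ⟨hmem, hne, hpre⟩ := pvFirstMatch_some_facts h
      obtain ⟨R, rfl⟩ := hpre
      have hlenR : R.length ≤ n := by
        have h2 : 0 < p.1.length := List.length_pos_iff.mpr hne
        simp only [List.length_append] at hl
        omega
      by_cases hcase : "P".toList <:+ p.2 ∧ pvRES <+: R
      · obtain ⟨hP, hres⟩ := hcase
        obtain ⟨R', rfl⟩ := hres
        obtain ⟨w, habbr, hidA⟩ := pvCaseIIWrap h hP
        have hidB : pvScanR (p.1 ++ (pvRES ++ R')) = p.2 ++ (pvRES ++ pvScanR R') := by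
          rw [pvScanR_some h, List.drop_left, pvScanWord pvRES R' pvResHead]
        have hlenR' : R'.length ≤ n := by
          have h8 : pvRES.length = 8 := by decide
          simp only [List.length_append] at hlenR
          omega
        have ihr := ih R' hlenR'
        rw [hidA, hidB, habbr]
        have hPA : pvNcc pvPresPair.2 = 4 := by decide
        have hP1 : pvNcc ['P'] = 1 := by decide
        have hRES : pvNcc pvRES = 8 := by decide
        simp only [pvNcc_append]
        have h1 := ihr.1
        exact ⟨by omega, fun _ => by omega⟩
      · have hidA := pvCaseI h hcase
        have hidB : pvScanR (p.1 ++ R) = p.2 ++ pvScanR R := by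
          rw [pvScanR_some h, List.drop_left]
        have ihr := ih R hlenR
        rw [hidA, hidB]
        simp only [pvNcc_append]
        refine ⟨by have := ihr.1; omega, ?_⟩
        intro hb
        have hbR := pvBadSplit hmem hb hcase
        have := ihr.2 hbR
        omega

-- ===== VERDICT (by name: the statement is the Claim_ definition above) =====
theorem abbreviate_role_spec : Claim_unchanged_abbreviate_role := by
  intro role _ hnd
  show abbreviate_role role = abbreviate_role_alt role
  rw [pvA_unfold, pvB_unfold]
  have hnb : ¬ pvBAD <:+: role.toList := by
    intro hinf
    apply hnd
    unfold D_abbreviate_role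
    rw [PySem.Str.isIn_eq]
    exact (PySem.Chars.isIn_iff_infix _ _).mpr hinf
  rw [pvMaster role.toList.length role.toList le_rfl hnb]

theorem abbreviate_role_changed : Claim_changed_abbreviate_role := by
  unfold Claim_changed_abbreviate_role; decide

theorem abbreviate_role_tight : Claim_exact_abbreviate_role := by
  intro role _ hd heq
  have hinf : pvBAD <:+: role.toList := by
    unfold D_abbreviate_role at hd
    rw [PySem.Str.isIn_eq] at hd
    exact (PySem.Chars.isIn_iff_infix _ _).mp hd
  rw [pvA_unfold, pvB_unfold] at heq
  have hl := congrArg String.toList heq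
  rw [String.toList_ofList, String.toList_ofList] at hl
  have hncc := congrArg pvNcc hl
  rw [pvNccRstrip, pvNccRstrip] at hncc
  have hlt := (pvTight role.toList.length role.toList le_rfl).2 hinf
  omega
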